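-- pv_equiv track=rewrite | github.com/Fortune-Adekogbe/Python-Intermediate-30daysofcode.xyz | day 20/2D ARRAY.py | loop_read
-- ===== SOURCE A (Python) =====
-- def read_loop(arr,st,m,n):
--     '''
--     Reads one cyclic path of a 2d array
--     m is the row index of right bottom corner
--     n is the column index of the right bottom corner
--     st is the index of the top left corner
--     '''
--     ans=''
--     if st==m:
--         for i in range(st,n+1):
--             ans+=str(arr[st][i])+' '
--         return ans
--     elif st==n:
--         for i in range(st,m+1):
--             ans+=str(arr[i][st])+' '
--         return ans
--     #moving right on first row forward
--     for i in range(st,n):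
--         ans+=str(arr[st][i])+' '
--     #moving down on right side
--     for j in range(st,m):
--         ans+=str(arr[j][n])+' '
--
--     #mooving to the left on last row
--     for k in range(n,st,-1):
--         ans+=str(arr[m][k])+' '
--
--     #moving up on the left side
--     for l in range(m,st,-1):
--         ans+=str(arr[l][st])+' '
--
--     return ans
--
-- def loop_read(arr):
--     '''
--     reads from a 2D array cyclicly
--     '''
--     assert all(type(i)==list for i in arr)
--     assert all(all(type(i)==int for i in j) for j in arr) or  all(all(type(i)==str for i in j) for j in arr)
--     start=0
--     m=len(arr)-1
--     n=len(arr[0])-1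
--     ans=''
--     while start<=m and start<=n:
--         ans+=read_loop(arr,start,m,n)
--         start+=1
--         m-=1
--         n-=1
--     return ans[:-1]
-- ===== SOURCE B (Python) =====
-- def loop_read(arr):
--     '''
--     reads from a 2D array cyclicly
--     '''
--     assert all(type(i)==list for i in arr)
--     assert all(all(type(i)==int for i in j) for j in arr) or all(all(type(i)==str for i in j) for j in arr)
--     C = len(arr[0])
--     grid = [row[:C] for row in arr]
--     out = []
--     while grid:
--         out += grid[0]
--         grid = [list(r) for r in zip(*grid[1:])][::-1]
--     return ' '.join(map(str, out))
-- ===== Notes on version B (the rewrite author's own statement) =====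
-- stated objective: alternative
-- what changed: Replaced the ring-by-ring traversal (per-ring helper with three special-case branches and four hand-rolled index loops, str(x)+' ' concatenation and the ans[:-1] trim) by a peel-and-rotate algorithm: repeatedly emit the first row and rotate the remaining grid 90 degrees counter-clockwise with zip(*grid[1:])[::-1], then join once with ' '.
import Mathlib
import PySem

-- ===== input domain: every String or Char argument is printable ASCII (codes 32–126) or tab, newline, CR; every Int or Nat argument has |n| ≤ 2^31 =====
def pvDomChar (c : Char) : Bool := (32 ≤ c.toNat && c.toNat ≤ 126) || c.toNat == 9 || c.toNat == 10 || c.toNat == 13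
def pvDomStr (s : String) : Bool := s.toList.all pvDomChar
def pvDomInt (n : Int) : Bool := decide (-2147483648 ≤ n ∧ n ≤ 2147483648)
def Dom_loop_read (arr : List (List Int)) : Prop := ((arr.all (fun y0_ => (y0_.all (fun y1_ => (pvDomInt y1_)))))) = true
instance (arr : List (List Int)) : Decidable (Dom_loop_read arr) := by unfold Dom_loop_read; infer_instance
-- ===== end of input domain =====

-- B replaces A's ring-by-ring loop (per-ring helper with three branches and four index loops, str(x)+' '
-- concatenation, ans[:-1]) by a different algorithm: peel the first row, rotate the remainder 90°
-- counter-clockwise (zip + reverse), repeat until empty, then join once with ' ' (objective: alternative).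

-- ===== PORT A =====
-- arr[i][j]; Pre_loop_read guarantees every index used is in range (Python raises IndexError otherwise)
def pvCell (arr : List (List Int)) (i j : Int) : Int :=
  PySem.List.pyGetD (PySem.List.pyGetD arr i []) j 0

def read_loop (arr : List (List Int)) (st m n : Int) : String :=
  if st = m then
    (PySem.List.pyRange st (n+1) 1).foldl (fun ans i => ans ++ PySem.Int.toStr (pvCell arr st i) ++ " ") ""
  else if st = n then
    (PySem.List.pyRange st (m+1) 1).foldl (fun ans i => ans ++ PySem.Int.toStr (pvCell arr i st) ++ " ") ""
  else
    let ans := (PySem.List.pyRange st n 1).foldl (fun ans i => ans ++ PySem.Int.toStr (pvCell arr st i) ++ " ") ""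
    let ans := (PySem.List.pyRange st m 1).foldl (fun ans j => ans ++ PySem.Int.toStr (pvCell arr j n) ++ " ") ans
    let ans := (PySem.List.pyRange n st (-1)).foldl (fun ans k => ans ++ PySem.Int.toStr (pvCell arr m k) ++ " ") ans
    let ans := (PySem.List.pyRange m st (-1)).foldl (fun ans l => ans ++ PySem.Int.toStr (pvCell arr l st) ++ " ") ans
    ans

def pvLoopA (arr : List (List Int)) (start m n : Int) (ans : String) : String :=
  if start ≤ m ∧ start ≤ n then
    pvLoopA arr (start+1) (m-1) (n-1) (ans ++ read_loop arr start m n)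
  else ans
termination_by (m - start + 1).toNat
decreasing_by omega

-- the two asserts always hold for a value of type List (List Int)
def loop_read (arr : List (List Int)) : String :=
  PySem.Str.slice
    (pvLoopA arr 0 ((arr.length : Int) - 1) (((PySem.List.pyGetD arr 0 []).length : Int) - 1) "")
    none (some (-1))

-- ===== PORT B =====
-- zip(*g) : Python's zip — transpose truncated to the shortest row (ported by its contract)
def pyZipT (g : List (List Int)) : List (List Int) :=
  (List.range ((g.map List.length).foldr min (g.headD []).length)).map
    (fun j => g.map (fun r => r.getD j 0))

-- max row width, used only for termination of pvPeel
def pvMaxW (g : List (List Int)) : Nat := (g.map List.length).foldr Nat.max 0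

theorem pvLen_le_maxW (g : List (List Int)) (r : List Int) (hr : r ∈ g) : r.length ≤ pvMaxW g := by
  induction g with
  | nil => cases hr
  | cons a t ih =>
    rcases List.mem_cons.mp hr with rfl | h
    · simp [pvMaxW]
    · have := ih h
      simp only [pvMaxW, List.map_cons, List.foldr_cons]
      exact le_trans (by simpa [pvMaxW] using this) (Nat.le_max_right _ _)

theorem pvMaxW_le (g : List (List Int)) (k : Nat) (h : ∀ r ∈ g, r.length ≤ k) : pvMaxW g ≤ k := by
  induction g with
  | nil => simp [pvMaxW]
  | cons a t ih =>
    simp only [pvMaxW, List.map_cons, List.foldr_cons]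
    exact Nat.max_le.mpr ⟨h a (by simp), by
      simpa [pvMaxW] using ih (fun r hr => h r (by simp [hr]))⟩

theorem pvFoldr_min_le_init (l : List Nat) (i : Nat) : l.foldr min i ≤ i := by
  induction l with
  | nil => simp
  | cons a t ih => exact le_trans (by simp only [List.foldr_cons]; exact min_le_right _ _) ih

theorem pvZip_len_le (g : List (List Int)) : (pyZipT g).length ≤ (g.headD []).length := by
  simp only [pyZipT, List.length_map, List.length_range]
  exact pvFoldr_min_le_init _ _

theorem pvZip_row_len (g : List (List Int)) : ∀ r ∈ pyZipT g, r.length = g.length := by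
  intro r hr
  simp only [pyZipT, List.mem_map, List.mem_range] at hr
  obtain ⟨j, _, rfl⟩ := hr
  simp

-- the while loop of B: out += grid[0]; grid = rotate-CCW(grid[1:])
def pvPeel (g : List (List Int)) (out : List Int) : List Int :=
  if h : g = [] then out
  else pvPeel ((pyZipT g.tail).reverse) (out ++ g.headD [])
termination_by g.length + pvMaxW g
decreasing_by
  cases g with
  | nil => exact absurd rfl h
  | cons a t =>
    have h1 : ((pyZipT t).reverse).length ≤ pvMaxW (a :: t) := by
      cases t with
      | nil => simp [pyZipT]
      | cons b u =>
        have hz := pvZip_len_le (b :: u)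
        have hb : b.length ≤ pvMaxW (a :: b :: u) := pvLen_le_maxW _ b (by simp)
        simp only [List.headD_cons] at hz
        simp only [List.length_reverse]
        omega
    have h2 : pvMaxW ((pyZipT t).reverse) ≤ t.length := by
      apply pvMaxW_le
      intro r hr
      rw [List.mem_reverse] at hr
      exact le_of_eq (pvZip_row_len t r hr)
    simp only [List.tail_cons, List.length_cons]
    omega

def loop_read_alt (arr : List (List Int)) : String :=
  PySem.Str.join " "
    ((pvPeel
        (arr.map (fun row =>
          PySem.List.slice row none (some ((PySem.List.pyGetD arr 0 []).length : Int))))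
        []).map PySem.Int.toStr)

-- ===== PRECONDITION & SPEC =====
-- exactly the inputs on which A returns: a nonempty arr (len of the first row raises IndexError on an empty arr) every row of which
-- is at least as long as the first row (layer 0 reads every row at column len(arr[0])-1, so a shorter
-- row makes A raise IndexError)
def Pre_loop_read (arr : List (List Int)) : Prop :=
  arr ≠ [] ∧ ∀ row ∈ arr, (PySem.List.pyGetD arr 0 []).length ≤ row.length
instance (arr : List (List Int)) : Decidable (Pre_loop_read arr) := by unfold Pre_loop_read; infer_instance

def pvWitness_loop_read : List (List Int) := [[1, 2, 3], [4, 5, 6], [7, 8, 9]]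

def Spec_loop_read (arr : List (List Int)) (out : String) : Prop := out = loop_read_alt arr
instance (arr : List (List Int)) (out : String) : Decidable (Spec_loop_read arr out) := by unfold Spec_loop_read; infer_instance

-- ===== CLAIM (what is proved, stated in full; the proofs are below) =====
def Claim_equal_loop_read : Prop := ∀ (arr : List (List Int)), Dom_loop_read arr → Pre_loop_read arr → Spec_loop_read arr (loop_read arr)

-- ===== LEMMAS AND PROOFS =====

-- one ring of the spiral, as A reads it (t = top row, b = bottom row, l = left col, r = right col)
def pvLayer (arr : List (List Int)) (t b l r : Int) : List Int :=
  PySem.List.slice (PySem.List.pyGetD arr t []) (some l) (some (r+1))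
  ++ (PySem.List.pyRange (t+1) (b+1) 1).map (fun i => pvCell arr i r)
  ++ (if t < b ∧ l < r then
        (PySem.List.pyRange (r-1) (l-1) (-1)).map (fun k => pvCell arr b k)
        ++ (PySem.List.pyRange (b-1) t (-1)).map (fun l' => pvCell arr l' l)
      else [])

def pvSpiral (arr : List (List Int)) (t b l r : Int) : List Int :=
  if t ≤ b ∧ l ≤ r then pvLayer arr t b l r ++ pvSpiral arr (t+1) (b-1) (l+1) (r-1) else []
termination_by (b - t + 1).toNat
decreasing_by omega

-- the characters A appends for a cell list: "str(x) " per cell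
def pvStrOfL (l : List Int) : List Char :=
  (l.map (fun x => PySem.Int.toChars x ++ [' '])).flatten

theorem pvToList_foldl_sp (g : Int → String) (l : List Int) (init : String) :
    (l.foldl (fun s x => s ++ g x ++ " ") init).toList
      = init.toList ++ (l.map (fun x => (g x).toList ++ [' '])).flatten := by
  induction l generalizing init with
  | nil => simp
  | cons y t ih => simp [List.foldl_cons, ih]

theorem pvSlice_eq_map (xs : List Int) (a b : Int) (h0 : 0 ≤ a) (hab : a ≤ b)
    (hb : b ≤ (xs.length : Int)) :
    PySem.List.slice xs (some a) (some b)
      = (PySem.List.pyRange a b 1).map (fun i => PySem.List.pyGetD xs i 0) := by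
  rw [PySem.List.slice_toNat xs h0 (le_trans h0 hab), PySem.List.pyRange_one]
  apply List.ext_getElem
  · simp; omega
  · intro k h1 h2
    simp only [List.getElem_take, List.getElem_drop, List.getElem_map, List.getElem_range]
    rw [PySem.List.pyGetD_eq_getElem xs 0 (by simp at h2; omega) (by simp at h2; omega)]
    congr 1
    simp at h2
    omega

theorem pvRange_neg_one_snoc (a b : Int) (h : b + 1 ≤ a) :
    PySem.List.pyRange a b (-1) = PySem.List.pyRange a (b+1) (-1) ++ [b+1] := by
  rw [PySem.List.pyRange_neg_one_eq_reverse, PySem.List.pyRange_neg_one_eq_reverse,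
      PySem.List.pyRange_one_cons (by omega)]
  simp

theorem pvRead_loop_eq (arr : List (List Int)) (s m n : Int)
    (hm : s ≤ m) (hn : s ≤ n) (h0 : 0 ≤ s)
    (hlen : n + 1 ≤ ((PySem.List.pyGetD arr s []).length : Int)) :
    (read_loop arr s m n).toList = pvStrOfL (pvLayer arr s m s n) := by
  have hsl : PySem.List.slice (PySem.List.pyGetD arr s []) (some s) (some (n+1))
      = (PySem.List.pyRange s (n+1) 1).map (fun i => PySem.List.pyGetD (PySem.List.pyGetD arr s []) i 0) :=
    pvSlice_eq_map _ _ _ h0 (by omega) hlen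
  rcases eq_or_lt_of_le hm with hsm | hsm
  · -- single row: st == m
    subst hsm
    rw [read_loop, if_pos rfl]
    simp only [pvLayer, hsl, pvStrOfL]
    rw [pvToList_foldl_sp]
    simp [PySem.List.pyRange_one_eq_nil (le_refl (s+1)), pvCell, PySem.Int.toList_toStr, Function.comp_def]
  rcases eq_or_lt_of_le hn with hsn | hsn
  · -- single column: st == n (and st ≠ m)
    subst hsn
    rw [read_loop, if_neg (by omega : ¬ s = m), if_pos rfl]
    simp only [pvLayer, hsl, pvStrOfL]
    rw [pvToList_foldl_sp]
    rw [PySem.List.pyRange_one_cons (by omega : s < m + 1),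
        PySem.List.pyRange_one_singleton]
    simp [pvCell, PySem.Int.toList_toStr, Function.comp_def]
  · -- general ring
    rw [read_loop, if_neg (by omega : ¬ s = m), if_neg (by omega : ¬ s = n)]
    simp only [pvLayer, hsl, pvStrOfL]
    rw [pvToList_foldl_sp, pvToList_foldl_sp, pvToList_foldl_sp, pvToList_foldl_sp]
    rw [if_pos ⟨hsm, hsn⟩]
    -- split the ranges at the four corners
    rw [show PySem.List.pyRange s (n+1) 1 = PySem.List.pyRange s n 1 ++ [n] from by
          simpa using PySem.List.pyRange_one_succ_right hn,
        show PySem.List.pyRange (s+1) (m+1) 1 = PySem.List.pyRange (s+1) m 1 ++ [m] from by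
          simpa using PySem.List.pyRange_one_succ_right (a := s+1) (b := m) (by omega),
        show PySem.List.pyRange s m 1 = s :: PySem.List.pyRange (s+1) m 1 from
          PySem.List.pyRange_one_cons hsm,
        show PySem.List.pyRange n s (-1) = n :: PySem.List.pyRange (n-1) s (-1) from
          PySem.List.pyRange_neg_one_cons hsn,
        show PySem.List.pyRange (n-1) (s-1) (-1) = PySem.List.pyRange (n-1) s (-1) ++ [s] from by
          simpa using pvRange_neg_one_snoc (n-1) (s-1) (by omega),
        show PySem.List.pyRange m s (-1) = m :: PySem.List.pyRange (m-1) s (-1) from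
          PySem.List.pyRange_neg_one_cons hsm]
    simp [pvCell, PySem.Int.toList_toStr, Function.comp_def]

theorem pvLoopA_eq (arr : List (List Int)) (C : Int)
    (hrow : ∀ row ∈ arr, C ≤ (row.length : Int)) :
    ∀ (t m n : Int) (ans : String), 0 ≤ t → m ≤ (arr.length : Int) - 1 - t → n ≤ C - 1 - t →
    (pvLoopA arr t m n ans).toList = ans.toList ++ pvStrOfL (pvSpiral arr t m t n) := by
  intro t m n ans
  fun_induction pvLoopA arr t m n ans with
  | case1 t m n ans h ih =>
    intro h0 hmL hnC
    have htL : t < (arr.length : Int) := by omega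
    have hmem : PySem.List.pyGetD arr t [] ∈ arr :=
      PySem.List.pyGetD_mem arr [] (by simp [PySem.Raise.InRange]; omega)
    have hlen : n + 1 ≤ ((PySem.List.pyGetD arr t []).length : Int) := by
      have := hrow _ hmem; omega
    rw [ih (by omega) (by omega) (by omega)]
    conv_rhs => rw [pvSpiral]
    rw [if_pos h]
    simp only [String.toList_append, pvStrOfL, List.map_append, List.flatten_append,
      List.append_assoc]
    rw [pvRead_loop_eq arr t m n h.1 h.2 h0 hlen]
    rfl
  | case2 t m n ans h =>
    intro _ _ _
    rw [pvSpiral, if_neg h]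
    simp [pvStrOfL]

theorem pvDropLast_strOfL (l : List Int) :
    (pvStrOfL l).dropLast = PySem.Chars.join [' '] (l.map PySem.Int.toChars) := by
  induction l with
  | nil => simp [pvStrOfL, PySem.Chars.join_nil]
  | cons x t ih =>
    cases t with
    | nil => simp [pvStrOfL, PySem.Chars.join_singleton]
    | cons y u =>
      have hne : pvStrOfL (y :: u) ≠ [] := by simp [pvStrOfL]
      have h1 : pvStrOfL (x :: y :: u) = (PySem.Int.toChars x ++ [' ']) ++ pvStrOfL (y :: u) := by
        simp [pvStrOfL]
      rw [h1, List.dropLast_append_of_ne_nil hne, ih]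
      simp only [List.map_cons]
      rw [PySem.Chars.join_cons_cons]

-- ---------- B-side: the peel-and-rotate recursion, numerically ----------

-- the peel recursion on an R×C "matrix as a function of indices"
def npeel (R C : Nat) (f : Nat → Nat → Int) : List Int :=
  if R = 0 then []
  else (List.range C).map (f 0) ++ npeel C (R-1) (fun p q => f (q+1) (C-1-p))
termination_by R + C
decreasing_by omega

theorem npeel_zero (C : Nat) (f : Nat → Nat → Int) : npeel 0 C f = [] := by
  rw [npeel]
  simp

theorem npeel_succ (R C : Nat) (f : Nat → Nat → Int) (h : R ≠ 0) :
    npeel R C f = (List.range C).map (f 0) ++ npeel C (R-1) (fun p q => f (q+1) (C-1-p)) := by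
  conv_lhs => rw [npeel]
  rw [if_neg h]

theorem npeel_width0 (R : Nat) (f : Nat → Nat → Int) : npeel R 0 f = [] := by
  cases R with
  | zero => exact npeel_zero _ _
  | succ R' => rw [npeel_succ _ _ _ (Nat.succ_ne_zero _), npeel_zero]; simp

theorem npeel_row (C : Nat) (f : Nat → Nat → Int) :
    npeel 1 C f = (List.range C).map (f 0) := by
  rw [npeel_succ _ _ _ one_ne_zero]
  simp [npeel_width0]

theorem npeel_col (R : Nat) (f : Nat → Nat → Int) (hR : 1 ≤ R) :
    npeel R 1 f = f 0 0 :: (List.range (R-1)).map (fun q => f (q+1) 0) := by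
  rw [npeel_succ _ _ _ (by omega), npeel_row]
  simp

theorem npeel_congr : ∀ (n R C : Nat) (f g : Nat → Nat → Int), R + C ≤ n →
    (∀ i j, i < R → j < C → f i j = g i j) → npeel R C f = npeel R C g := by
  intro n
  induction n with
  | zero =>
    intro R C f g hn _
    have : R = 0 := by omega
    subst this
    rw [npeel_zero, npeel_zero]
  | succ n ih =>
    intro R C f g hn hfg
    by_cases h : R = 0
    · subst h; rw [npeel_zero, npeel_zero]
    · rw [npeel_succ _ _ _ h, npeel_succ _ _ _ h]
      congr 1
      · exact List.map_congr_left (fun j hj => hfg 0 j (by omega) (List.mem_range.mp hj))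
      · exact ih C (R-1) _ _ (by omega)
          (fun p q hp hq => hfg (q+1) (C-1-p) (by omega) (by omega))

theorem npeel_ring (R C : Nat) (f : Nat → Nat → Int) (hR : 2 ≤ R) (hC : 2 ≤ C) :
    npeel R C f = (List.range C).map (f 0)
      ++ (List.range (R-1)).map (fun q => f (q+1) (C-1))
      ++ (List.range (C-1)).map (fun q => f (R-1) (C-2-q))
      ++ (List.range (R-2)).map (fun q => f (R-2-q) 0)
      ++ npeel (R-2) (C-2) (fun i j => f (i+1) (j+1)) := by
  have hf2 : ∀ {a b a' b' : Nat}, a = a' → b = b' → f a b = f a' b' := by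
    intro a b a' b' h1 h2; rw [h1, h2]
  rw [npeel_succ R C f (by omega)]
  rw [npeel_succ C (R-1) _ (by omega)]
  rw [npeel_succ (R-1) (C-1) _ (by omega)]
  rw [npeel_succ (C-1) (R-1-1) _ (by omega)]
  have e2 : (List.range (R-1)).map (fun q => f (q+1) (C-1-0))
      = (List.range (R-1)).map (fun q => f (q+1) (C-1)) := by simp
  have e3 : (List.range (C-1)).map (fun q => f (R-1-1-0+1) (C-1-(q+1)))
      = (List.range (C-1)).map (fun q => f (R-1) (C-2-q)) :=
    List.map_congr_left (fun q hq => hf2 (by omega) (by omega))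
  have e4 : (List.range (R-1-1)).map (fun q => f (R-1-1-(q+1)+1) (C-1-(C-1-1-0+1)))
      = (List.range (R-2)).map (fun q => f (R-2-q) 0) := by
    rw [show R-1-1 = R-2 from by omega]
    exact List.map_congr_left (fun q hq => by
      have hq' := List.mem_range.mp hq
      exact hf2 (by omega) (by omega))
  have e5 : npeel (R-1-1) (C-1-1)
        (fun p q => f (R-1-1-(R-1-1-1-p+1)+1) (C-1-(C-1-1-(q+1)+1)))
      = npeel (R-2) (C-2) (fun i j => f (i+1) (j+1)) := by
    rw [show R-1-1 = R-2 from by omega, show C-1-1 = C-2 from by omega]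
    exact npeel_congr (R+C) _ _ _ _ (by omega)
      (fun p q hp hq => hf2 (by omega) (by omega))
  rw [e2, e3, e4, e5]
  simp [List.append_assoc]

-- Python zip(*g) of a canonical rectangular grid is the transpose
theorem pvFoldr_min_replicate (R C : Nat) : (List.replicate R C).foldr min C = C := by
  induction R with
  | zero => rfl
  | succ R' ih => simp [List.replicate_succ, ih]

theorem pvZip_canon (R C : Nat) (f : Nat → Nat → Int) (hR : 1 ≤ R) :
    pyZipT ((List.range R).map (fun i => (List.range C).map (f i)))
      = (List.range C).map (fun j => (List.range R).map (fun i => f i j)) := by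
  unfold pyZipT
  have hlen : (((List.range R).map (fun i => (List.range C).map (f i))).map List.length)
      = List.replicate R C := by
    rw [List.map_map]
    simp [Function.comp_def, List.map_const']
  have hhead : (((List.range R).map (fun i => (List.range C).map (f i))).headD []).length = C := by
    cases R with
    | zero => omega
    | succ R' => simp [List.range_succ_eq_map]
  rw [hlen, hhead, pvFoldr_min_replicate]
  apply List.map_congr_left
  intro j hj
  rw [List.map_map]
  apply List.map_congr_left
  intro i _
  simp only [Function.comp_def]
  rw [List.getD_eq_getElem _ _ (by simpa using List.mem_range.mp hj)]
  simp

theorem pvRevMapRange {α : Type} (C : Nat) (h : Nat → α) :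
    ((List.range C).map h).reverse = (List.range C).map (fun p => h (C-1-p)) := by
  apply List.ext_getElem
  · simp
  · intro k h1 h2
    simp [List.getElem_reverse]

-- converting int-indexed Python ranges to Nat ranges
theorem pvIntMapNat (a b : Int) (g : Int → Int) :
    (PySem.List.pyRange a b 1).map g
      = (List.range (b-a).toNat).map (fun (k : Nat) => g (a + (k : Int))) := by
  rw [PySem.List.pyRange_one, List.map_map]
  simp [Function.comp_def]

theorem pvIntMapNatDown (a b : Int) (g : Int → Int) :
    (PySem.List.pyRange a b (-1)).map g
      = (List.range (a-b).toNat).map (fun (k : Nat) => g (a - (k : Int))) := by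
  rw [PySem.List.pyRange_neg_one, List.map_map]
  simp [Function.comp_def]

-- the while loop of B on a canonical grid is npeel
theorem pvPeel_canon : ∀ (n R C : Nat) (f : Nat → Nat → Int) (out : List Int), R + C ≤ n →
    pvPeel ((List.range R).map (fun i => (List.range C).map (f i))) out = out ++ npeel R C f := by
  intro n
  induction n with
  | zero =>
    intro R C f out hn
    have hR : R = 0 := by omega
    subst hR
    rw [npeel_zero]
    simp [pvPeel]
  | succ n ih =>
    intro R C f out hn
    cases R with
    | zero => rw [npeel_zero]; simp [pvPeel]
    | succ R' =>
      have hgrid : (List.range (R'+1)).map (fun i => (List.range C).map (f i))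
          = ((List.range C).map (f 0)) :: (List.range R').map (fun i => (List.range C).map (f (i+1))) := by
        rw [List.range_succ_eq_map]
        simp [Function.comp_def]
      rw [hgrid, pvPeel, dif_neg (by simp)]
      simp only [List.tail_cons, List.headD_cons]
      cases R' with
      | zero =>
        have hz : pyZipT ((List.range 0).map (fun i => (List.range C).map (f (i+1)))) = [] := by
          simp [pyZipT]
        rw [hz]
        simp only [List.reverse_nil]
        rw [pvPeel, dif_pos rfl]
        rw [npeel_succ _ _ _ (Nat.succ_ne_zero _), npeel_width0]
        simp
      | succ R'' =>
        have hrot : (pyZipT ((List.range (R''+1)).map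
              (fun i => (List.range C).map (f (i+1))))).reverse
            = (List.range C).map (fun p => (List.range (R''+1)).map
                (fun q => f (q+1) (C-1-p))) := by
          rw [pvZip_canon (R''+1) C _ (by omega), pvRevMapRange]
        rw [hrot]
        rw [ih C (R''+1) (fun p q => f (q+1) (C-1-p)) _ (by omega)]
        rw [npeel_succ (R''+1+1) C f (by omega)]
        simp [List.append_assoc]

-- A's ring spiral is npeel
theorem pvSpiral_eq_npeel (arr : List (List Int)) :
    ∀ (n : Nat) (t b r : Int), (b - t + 1).toNat ≤ n → 0 ≤ t → b < (arr.length : Int) →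
    (∀ row ∈ arr, r + 1 ≤ (row.length : Int)) →
    pvSpiral arr t b t r
      = npeel (b - t + 1).toNat (r - t + 1).toNat
          (fun i j => pvCell arr (t + (i : Int)) (t + (j : Int))) := by
  intro n
  induction n with
  | zero =>
    intro t b r hn h0 hb hrow
    rw [pvSpiral, if_neg (by omega)]
    rw [show (b - t + 1).toNat = 0 from by omega, npeel_zero]
  | succ n ih =>
    intro t b r hn h0 hb hrow
    have hcell : ∀ {x y x' y' : Int}, x = x' → y = y' → pvCell arr x y = pvCell arr x' y' := by
      intro x y x' y' h1 h2; rw [h1, h2]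
    by_cases hc : t ≤ b ∧ t ≤ r
    · obtain ⟨hcb, hcr⟩ := hc
      have hmem : PySem.List.pyGetD arr t [] ∈ arr :=
        PySem.List.pyGetD_mem arr [] (by simp [PySem.Raise.InRange]; omega)
      have hlen : r + 1 ≤ ((PySem.List.pyGetD arr t []).length : Int) := hrow _ hmem
      have hslice : PySem.List.slice (PySem.List.pyGetD arr t []) (some t) (some (r+1))
          = (List.range (r-t+1).toNat).map
              (fun (k : Nat) => pvCell arr t (t + (k : Int))) := by
        rw [pvSlice_eq_map _ _ _ h0 (by omega) hlen, pvIntMapNat]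
        rw [show r + 1 - t = r - t + 1 from by ring]
        rfl
      rw [pvSpiral, if_pos ⟨hcb, hcr⟩, pvLayer]
      rcases eq_or_lt_of_le hcb with hb1 | hb1
      · -- single row: t = b
        rw [← hb1]
        rw [show (t - t + 1).toNat = 1 from by omega, npeel_row]
        rw [PySem.List.pyRange_one_eq_nil (le_refl (t+1))]
        rw [pvSpiral, if_neg (by omega), if_neg (by omega)]
        rw [hslice]
        simp only [List.map_nil, List.append_nil]
        exact List.map_congr_left (fun k _ => hcell (by simp) (by simp))
      rcases eq_or_lt_of_le hcr with hr1 | hr1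
      · -- single column: t = r (t < b)
        rw [← hr1] at hslice ⊢
        rw [show (t - t + 1).toNat = 1 from by omega] at hslice ⊢
        rw [npeel_col _ _ (by omega)]
        rw [pvSpiral, if_neg (by omega), if_neg (by omega)]
        rw [hslice]
        rw [pvIntMapNat]
        rw [show b + 1 - (t + 1) = b - t from by ring,
            show ((b - t + 1).toNat - 1) = (b - t).toNat from by omega]
        simp only [List.range_one, List.map_cons, List.map_nil, List.append_nil,
          List.cons_append, List.nil_append]
        congr 1
        · exact hcell (by simp) rfl
        · exact List.map_congr_left (fun k hk => by
            have hk' := List.mem_range.mp hk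
            exact hcell (by push_cast; omega) (by simp))
      · -- general ring: t < b, t < r
        rw [if_pos ⟨hb1, hr1⟩]
        rw [npeel_ring _ _ _ (by omega) (by omega)]
        rw [hslice, pvIntMapNat, pvIntMapNatDown, pvIntMapNatDown]
        rw [ih (t+1) (b-1) (r-1) (by omega) (by omega) (by omega)
            (by intro row hrw; have := hrow row hrw; omega)]
        rw [show b + 1 - (t + 1) = b - t from by ring,
            show r - 1 - (t - 1) = r - t from by ring,
            show b - 1 - t = b - t - 1 from by ring,
            show ((b - t + 1).toNat - 1) = (b - t).toNat from by omega,
            show ((r - t + 1).toNat - 1) = (r - t).toNat from by omega,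
            show ((b - t + 1).toNat - 2) = (b - t - 1).toNat from by omega,
            show ((r - t + 1).toNat - 2) = (r - t - 1).toNat from by omega,
            show (b - 1 - (t + 1) + 1).toNat = (b - t - 1).toNat from by omega,
            show (r - 1 - (t + 1) + 1).toNat = (r - t - 1).toNat from by omega]
        simp only [List.append_assoc]
        congr 1
        · exact List.map_congr_left (fun k _ => hcell (by simp) rfl)
        congr 1
        · exact List.map_congr_left (fun k hk => by
            have hk' := List.mem_range.mp hk
            exact hcell (by push_cast; omega) (by push_cast; omega))
        congr 1
        · exact List.map_congr_left (fun k hk => by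
            have hk' := List.mem_range.mp hk
            exact hcell (by push_cast; omega) (by push_cast; omega))
        congr 1
        · exact List.map_congr_left (fun k hk => by
            have hk' := List.mem_range.mp hk
            exact hcell (by push_cast; omega) (by push_cast; omega))
        · apply npeel_congr ((b - t + 1).toNat + (r - t + 1).toNat) _ _ _ _ (by omega)
          intro i j _ _
          exact hcell (by push_cast; ring) (by push_cast; ring)
    · rw [pvSpiral, if_neg hc]
      by_cases hbt : b < t
      · rw [show (b - t + 1).toNat = 0 from by omega, npeel_zero]
      · rw [show (r - t + 1).toNat = 0 from by omega, npeel_width0]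

-- ===== VERDICT (by name: the statement is the Claim_ definition above) =====
theorem loop_read_spec : Claim_equal_loop_read := by
  intro arr _hdom hpre
  unfold Spec_loop_read loop_read loop_read_alt
  obtain ⟨hne, hrows⟩ := hpre
  have hL : 0 < arr.length := List.length_pos_iff.mpr hne
  have hrow' : ∀ row ∈ arr, (((PySem.List.pyGetD arr 0 []).length : Int)) ≤ (row.length : Int) := by
    intro row hr
    exact_mod_cast hrows row hr
  -- B's grid is the canonical rectangular grid of arr
  have hgrid : arr.map (fun row =>
        PySem.List.slice row none (some ((PySem.List.pyGetD arr 0 []).length : Int)))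
      = (List.range arr.length).map (fun (i : Nat) =>
          (List.range (PySem.List.pyGetD arr 0 []).length).map
            (fun (j : Nat) => pvCell arr ((i : Int)) ((j : Int)))) := by
    apply List.ext_getElem
    · simp
    · intro i h1 h2
      simp only [List.length_map] at h1
      simp only [List.getElem_map, List.getElem_range]
      rw [PySem.List.slice_to _ (by positivity)]
      have hmemi : arr[i] ∈ arr := List.getElem_mem _
      have hleni := hrows arr[i] hmemi
      apply List.ext_getElem
      · simp only [List.length_take, List.length_map, List.length_range, Int.toNat_natCast]
        omega
      · intro j hj1 hj2
        simp only [List.length_take, Int.toNat_natCast] at hj1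
        simp only [List.length_map, List.length_range] at hj2
        simp only [List.getElem_take, List.getElem_map, List.getElem_range]
        unfold pvCell
        rw [PySem.List.pyGetD_eq_getElem (i := ((i : Nat) : Int)) arr []
          (by positivity) (by push_cast; omega)]
        rw [PySem.List.pyGetD_eq_getElem (i := ((j : Nat) : Int)) _ 0
          (by positivity) (by simp only [Int.toNat_natCast]; push_cast; omega)]
        simp
  -- B's peel loop computes A's spiral
  have hpeel : pvPeel ((List.range arr.length).map (fun (i : Nat) =>
          (List.range (PySem.List.pyGetD arr 0 []).length).map
            (fun (j : Nat) => pvCell arr ((i : Int)) ((j : Int))))) []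
      = pvSpiral arr 0 ((arr.length : Int) - 1) 0 (((PySem.List.pyGetD arr 0 []).length : Int) - 1) := by
    rw [pvPeel_canon (arr.length + (PySem.List.pyGetD arr 0 []).length) _ _ _ [] le_rfl]
    rw [pvSpiral_eq_npeel arr (arr.length) 0 ((arr.length : Int) - 1)
        (((PySem.List.pyGetD arr 0 []).length : Int) - 1) (by omega) le_rfl (by omega)
        (by intro row hr; have := hrow' row hr; omega)]
    rw [show (((arr.length : Int) - 1) - 0 + 1).toNat = arr.length from by omega,
        show ((((PySem.List.pyGetD arr 0 []).length : Int) - 1) - 0 + 1).toNat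
          = (PySem.List.pyGetD arr 0 []).length from by omega]
    simp
  rw [← String.toList_inj]
  rw [show (PySem.Str.slice
      (pvLoopA arr 0 ((arr.length : Int) - 1) (((PySem.List.pyGetD arr 0 []).length : Int) - 1) "")
      none (some (-1))).toList
    = (pvLoopA arr 0 ((arr.length : Int) - 1) (((PySem.List.pyGetD arr 0 []).length : Int) - 1)
        "").toList.dropLast from PySem.Str.slice_to_neg_one _]
  rw [pvLoopA_eq arr _ hrow' 0 _ _ "" le_rfl (by omega) (by omega)]
  rw [show ("" : String).toList = [] from rfl, List.nil_append, pvDropLast_strOfL]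
  rw [hgrid, hpeel]
  rw [show (PySem.Str.join " " ((pvSpiral arr 0 ((arr.length : Int) - 1) 0
        (((PySem.List.pyGetD arr 0 []).length : Int) - 1)).map PySem.Int.toStr)).toList
      = PySem.Chars.join " ".toList (((pvSpiral arr 0 ((arr.length : Int) - 1) 0
        (((PySem.List.pyGetD arr 0 []).length : Int) - 1)).map PySem.Int.toStr).map String.toList)
      from PySem.Str.toList_join _ _]
  simp [Function.comp_def, PySem.Int.toList_toStr]
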